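-- pv_equiv track=rewrite | github.com/djbyrapatna/lendingInsights | parser/extract_data_row.py | fix_transaction_description
-- ===== SOURCE A (Python) =====
-- def fix_transaction_description(rows):
--     """
--     Processes extracted rows by:
--       1. Scanning for any entry in column 2 (index 1) with more than 2 newline characters.
--       2. Checking how many following rows have a None/empty entry in column 2,
--          storing that number in 'num_transactions_to_fix'.
--       3. Splitting the long text into groups such that:
--            - The first group remains in the row with the extended text.
--            - Each group stops immediately after the second newline is encountered.
--       4. Inserting the first 'num_transactions_to_fix' text groups into the subsequent rows by updating column 2.
--
--     The function assumes each row is a list and that column 2 is at index 1.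
--
--     Returns a new list of rows with the fixed descriptions.
--     """
--     fixed_rows = list(rows)  # shallow copy is enough if inner lists are replaced
--     num_rows = len(fixed_rows)
--     i = 0
--     while i < num_rows:
--         # Normalize the entry in column 2 for the current row.
--         cell = fixed_rows[i][1] if fixed_rows[i][1] is not None else ""
--         cell = cell.strip()
--         # Check if there are more than 2 newline characters.
--         if cell.count("\n") > 2:
--             # Count how many following rows have an empty entry in column 2.
--             num_transactions_to_fix = 0
--             j = i + 1
--             while j < num_rows and (fixed_rows[j][1] is None or fixed_rows[j][1].strip() == ""):
--                 num_transactions_to_fix += 1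
--                 j += 1
--
--             # Split the long text from cell into groups.
--             # We will iterate over the characters and break as soon as we see the second newline.
--             groups = []
--             current_group = ""
--             newline_count = 0
--             for ch in cell:
--                 current_group += ch
--                 if ch == "\n":
--                     newline_count += 1
--                     if newline_count == 2:
--                         groups.append(current_group)
--                         current_group = ""
--                         newline_count = 0
--             # Append any remaining text as the final group (if not empty).
--             if current_group:
--                 groups.append(current_group)
--
--             # Keep the first grouping in the original row.
--             # Then, assign the next groupings (up to num_transactions_to_fix) to the subsequent rows.
--             if groups:
--                 fixed_rows[i][1] = groups[0]
--                 for k in range(1, min(num_transactions_to_fix + 1, len(groups))):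
--                     fix_row_index = i + k
--                     fixed_rows[fix_row_index][1] = groups[k]
--             # If there are more groups than rows to fix, you can decide whether to merge them
--             # into the original row (after a separator) or ignore them.
--
--             # Skip ahead past the rows we just processed.
--             i = j
--         else:
--             i += 1
--     return fixed_rows
-- ===== SOURCE B (Python) =====
-- def fix_transaction_description(rows):
--     """Same fix, but the long cell is chunked by splitting on newlines and
--     re-joining parts two at a time instead of a char-by-char counter scan."""
--     fixed_rows = list(rows)
--     num_rows = len(fixed_rows)
--     i = 0
--     while i < num_rows:
--         cell = (fixed_rows[i][1] or "").strip()
--         if cell.count("\n") <= 2: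
--             i += 1
--             continue
--         # Count the blank following rows.
--         blanks = 0
--         while i + 1 + blanks < num_rows and not (fixed_rows[i + 1 + blanks][1] or "").strip():
--             blanks += 1
--         # Chunk the text: two lines (with their newlines) per group, tail joined back.
--         parts = cell.split("\n")
--         groups = []
--         while len(parts) > 2:
--             groups.append(parts[0] + "\n" + parts[1] + "\n")
--             parts = parts[2:]
--         tail = "\n".join(parts)
--         if tail:
--             groups.append(tail)
--         for k in range(min(blanks + 1, len(groups))):
--             fixed_rows[i + k][1] = groups[k]
--         i += 1 + blanks
--     return fixed_rows
-- ===== Notes on version B (the rewrite author's own statement) =====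
-- stated objective: alternative
-- what changed: B builds the description groups by splitting the cell on newlines and re-joining the parts two at a time (with the joined tail appended last) and writes all target rows in one uniform loop starting at the current row, instead of A's character-by-character scan with a running newline counter and a separate first-row write.
import Mathlib
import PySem

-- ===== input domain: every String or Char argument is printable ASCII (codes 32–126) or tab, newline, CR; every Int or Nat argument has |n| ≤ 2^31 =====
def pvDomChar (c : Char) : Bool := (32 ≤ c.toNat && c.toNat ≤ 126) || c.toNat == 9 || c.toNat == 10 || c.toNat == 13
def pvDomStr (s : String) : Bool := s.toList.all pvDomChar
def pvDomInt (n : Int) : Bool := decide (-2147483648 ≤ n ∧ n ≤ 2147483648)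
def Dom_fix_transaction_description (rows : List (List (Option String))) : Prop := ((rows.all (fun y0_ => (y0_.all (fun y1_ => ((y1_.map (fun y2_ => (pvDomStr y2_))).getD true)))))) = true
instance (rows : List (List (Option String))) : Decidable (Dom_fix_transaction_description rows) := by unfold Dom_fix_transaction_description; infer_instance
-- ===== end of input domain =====

-- B rebuilds the over-long description cell by splitting on newlines and re-joining the parts
-- two at a time (a joined tail last) and writes all target rows in one uniform loop, instead of
-- A's character-by-character scan with a newline counter and a separate first-row write;
-- objective: alternative (same cost). Both Pythons mutate the inner row lists in place
-- identically; the equivalence proved here is about the return value.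

-- ===== PORT A =====
-- 'fixed_rows[j][1] is None or fixed_rows[j][1].strip() == ""'
def pvBlankA (c : Option String) : Bool :=
  match c with
  | none => true
  | some s => PySem.Chars.strip s.toList == []

-- inner 'while j < num_rows and <blank>: j += 1', returning the final j
def pvFindJ (rs : List (List (Option String))) (n j : Nat) : Nat :=
  if _h : j < n then
    if pvBlankA ((rs.getD j []).getD 1 none) then pvFindJ rs n (j + 1) else j
  else j
termination_by n - j
decreasing_by exact Nat.sub_succ_lt_self n j _h

-- body of 'for ch in cell' building (groups, current_group, newline_count)
def pvStepA (st : List (List Char) × List Char × Nat) (ch : Char) :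
    List (List Char) × List Char × Nat :=
  let cur := st.2.1 ++ [ch]
  if ch = '\n' then
    if st.2.2 + 1 = 2 then (st.1 ++ [cur], [], 0) else (st.1, cur, st.2.2 + 1)
  else (st.1, cur, st.2.2)

-- 'if current_group: groups.append(current_group)'
def pvFinishA (st : List (List Char) × List Char × Nat) : List (List Char) :=
  if st.2.1 ≠ [] then st.1 ++ [st.2.1] else st.1

def pvGroupsA (cs : List Char) : List (List Char) :=
  pvFinishA (cs.foldl pvStepA ([], [], 0))

-- 'rows[idx][1] = v' (in-range by Pre_; List.set is the in-place write on values)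
def pvSetCell (rs : List (List (Option String))) (idx : Nat) (v : List Char) :
    List (List (Option String)) :=
  rs.set idx ((rs.getD idx []).set 1 (some (String.ofList v)))

-- needed by pvLoopA's decreasing_by
theorem pvFindJ_ge (rs : List (List (Option String))) (n j : Nat) : j ≤ pvFindJ rs n j := by
  fun_induction pvFindJ rs n j with
  | case1 j h hb ih => omega
  | case2 j h hb => omega
  | case3 j h => omega

-- the outer 'while i < num_rows' of A
def pvLoopA (n : Nat) (rs : List (List (Option String))) (i : Nat) :
    List (List (Option String)) :=
  if h : i < n then
    let cell := PySem.Chars.strip (((rs.getD i []).getD 1 none).getD "").toList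
    if 2 < PySem.Chars.count cell ['\n'] then
      let j := pvFindJ rs n (i + 1)
      let ntf := j - (i + 1)
      let groups := pvGroupsA cell
      let rs' :=
        if groups ≠ [] then
          (List.range' 1 (min (ntf + 1) groups.length - 1)).foldl
            (fun acc k => pvSetCell acc (i + k) (groups.getD k []))
            (pvSetCell rs i (groups.getD 0 []))
        else rs
      pvLoopA n rs' j
    else pvLoopA n rs (i + 1)
  else rs
termination_by n - i
decreasing_by
  · exact Nat.sub_lt_sub_left h
      (Nat.lt_of_lt_of_le (Nat.lt_succ_self i) (pvFindJ_ge rs n (i + 1)))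
  · exact Nat.sub_succ_lt_self n i h

def fix_transaction_description (rows : List (List (Option String))) :
    List (List (Option String)) :=
  pvLoopA rows.length rows 0

-- ===== PORT B =====
-- 'not (c or "").strip()'
def pvBlankB (c : Option String) : Bool := PySem.Chars.strip (c.getD "").toList == []

-- 'while i + 1 + blanks < num_rows and <blank>: blanks += 1'
def pvBlanksB (rs : List (List (Option String))) (n i b : Nat) : Nat :=
  if _h : i + 1 + b < n then
    if pvBlankB ((rs.getD (i + 1 + b) []).getD 1 none) then pvBlanksB rs n i (b + 1) else b
  else b
termination_by n - b
decreasing_by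
  exact Nat.sub_succ_lt_self n b (Nat.lt_of_le_of_lt (Nat.le_add_left b (i + 1)) _h)

-- 'while len(parts) > 2: take two parts; then the joined tail if non-empty'
def pvPairUp (parts : List (List Char)) : List (List Char) :=
  match parts with
  | a :: b :: rest@(_ :: _) => (a ++ '\n' :: (b ++ ['\n'])) :: pvPairUp rest
  | ps =>
    let tail := PySem.Chars.join ['\n'] ps
    if tail ≠ [] then [tail] else []

def pvGroupsB (cs : List Char) : List (List Char) :=
  pvPairUp (PySem.Chars.splitOn cs ['\n'])

-- the outer 'while i < num_rows' of B
def pvLoopB (n : Nat) (rs : List (List (Option String))) (i : Nat) :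
    List (List (Option String)) :=
  if h : i < n then
    let cell := PySem.Chars.strip (((rs.getD i []).getD 1 none).getD "").toList
    if PySem.Chars.count cell ['\n'] ≤ 2 then
      pvLoopB n rs (i + 1)
    else
      let blanks := pvBlanksB rs n i 0
      let groups := pvGroupsB cell
      let rs' := (List.range' 0 (min (blanks + 1) groups.length)).foldl
          (fun acc k => pvSetCell acc (i + k) (groups.getD k [])) rs
      pvLoopB n rs' (i + 1 + blanks)
  else rs
termination_by n - i
decreasing_by
  · exact Nat.sub_succ_lt_self n i h
  · exact Nat.sub_lt_sub_left h
      (Nat.lt_of_lt_of_le (Nat.lt_succ_self i) (Nat.le_add_right (i + 1) (pvBlanksB rs n i 0)))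

def fix_transaction_description_alt (rows : List (List (Option String))) :
    List (List (Option String)) :=
  pvLoopB rows.length rows 0

-- ===== PRECONDITION & SPEC =====
-- Pre_ excludes rows with fewer than 2 cells: Python A reads rows[i][1] of every row and
-- raises IndexError on such a row.
def Pre_fix_transaction_description (rows : List (List (Option String))) : Prop :=
  ∀ row ∈ rows, 2 ≤ row.length
instance (rows : List (List (Option String))) : Decidable (Pre_fix_transaction_description rows) := by
  unfold Pre_fix_transaction_description; infer_instance

def pvWitness_fix_transaction_description : List (List (Option String)) :=
  [[none, some "a\nb\nc\nd"], [some " ", none]]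

def Spec_fix_transaction_description (rows : List (List (Option String))) (out : List (List (Option String))) : Prop := out = fix_transaction_description_alt rows
instance (rows : List (List (Option String))) (out : List (List (Option String))) : Decidable (Spec_fix_transaction_description rows out) := by unfold Spec_fix_transaction_description; infer_instance

-- ===== CLAIM (what is proved, stated in full; the proofs are below) =====
def Claim_equal_fix_transaction_description : Prop := ∀ (rows : List (List (Option String))), Dom_fix_transaction_description rows → Pre_fix_transaction_description rows → Spec_fix_transaction_description rows (fix_transaction_description rows)

-- ===== LEMMAS AND PROOFS =====

-- spec of splitting on a single '\n' (proof-only helper)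
def pvSplitSpec (pre : List Char) (l : List Char) : List (List Char) :=
  match l with
  | [] => [pre]
  | ch :: rest => if ch = '\n' then pre :: pvSplitSpec [] rest else pvSplitSpec (pre ++ [ch]) rest


theorem pvSplitSpec_ne_nil (l pre : List Char) : pvSplitSpec pre l ≠ [] := by
  induction l generalizing pre with
  | nil => simp [pvSplitSpec]
  | cons ch rest ih =>
    by_cases h : ch = '\n' <;> simp [pvSplitSpec, h, ih]

theorem pvGo_eq (fuel : Nat) : ∀ (l cur : List Char) (acc : List (List Char)),
    l.length ≤ fuel →
    PySem.Chars.splitOn.go ['\n'] fuel l cur acc = acc.reverse ++ pvSplitSpec cur.reverse l := by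
  induction fuel with
  | zero =>
    intro l cur acc h
    have hl : l = [] := by cases l <;> simp_all
    subst hl
    simp [PySem.Chars.splitOn.go, pvSplitSpec]
  | succ fuel ih =>
    intro l cur acc h
    cases l with
    | nil => simp [PySem.Chars.splitOn.go, pvSplitSpec]
    | cons c rest =>
      have hlen : rest.length ≤ fuel := by simpa using h
      by_cases hc : c = '\n'
      · subst hc
        simp only [PySem.Chars.splitOn.go]
        have hpre : List.isPrefixOf ['\n'] ('\n' :: rest) = true := by
          simp [List.isPrefixOf]
        simp only [hpre, if_true, List.length_cons, List.length_nil, List.drop_succ_cons,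
          List.drop_zero]
        rw [ih rest [] (cur.reverse :: acc) hlen]
        simp [pvSplitSpec]
      · simp only [PySem.Chars.splitOn.go]
        have hpre : List.isPrefixOf ['\n'] (c :: rest) = false := by
          simp [List.isPrefixOf]
          intro e
          exact absurd e.symm hc
        simp only [hpre, Bool.false_eq_true, if_false]
        rw [ih rest (c :: cur) acc hlen]
        simp [pvSplitSpec, hc]

theorem pvSplitOn_eq (cs : List Char) :
    PySem.Chars.splitOn cs ['\n'] = pvSplitSpec [] cs := by
  have h := pvGo_eq (cs.length + 1) cs [] [] (by omega)
  simpa [PySem.Chars.splitOn] using h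

theorem pvJoin_splitSpec (l : List Char) : ∀ pre,
    PySem.Chars.join ['\n'] (pvSplitSpec pre l) = pre ++ l := by
  induction l with
  | nil => intro pre; simp [pvSplitSpec, PySem.Chars.join_singleton]
  | cons ch rest ih =>
    intro pre
    by_cases hc : ch = '\n'
    · subst hc
      obtain ⟨a, t, ht⟩ : ∃ a t, pvSplitSpec [] rest = a :: t := by
        rcases h' : pvSplitSpec ([] : List Char) rest with _ | ⟨a, t⟩
        · exact absurd h' (pvSplitSpec_ne_nil rest [])
        · exact ⟨a, t, rfl⟩
      have h2 := ih ([] : List Char)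
      rw [ht] at h2
      have hs : pvSplitSpec pre ('\n' :: rest) = pre :: pvSplitSpec [] rest := by
        simp [pvSplitSpec]
      rw [hs, ht, PySem.Chars.join_cons_cons, h2]
      simp
    · simp only [pvSplitSpec, if_neg hc]
      rw [ih (pre ++ [ch])]
      simp

theorem pvSplitSpec_noNL (l : List Char) : ∀ pre, '\n' ∉ pre →
    ∀ p ∈ pvSplitSpec pre l, '\n' ∉ p := by
  induction l with
  | nil =>
    intro pre h p hp
    simp [pvSplitSpec] at hp
    subst hp; exact h
  | cons ch rest ih =>
    intro pre h p hp
    by_cases hc : ch = '\n'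
    · subst hc
      have hp' : p = pre ∨ p ∈ pvSplitSpec [] rest := by
        simpa [pvSplitSpec] using hp
      rcases hp' with rfl | hp
      · exact h
      · exact ih [] (by simp) p hp
    · have hp' : p ∈ pvSplitSpec (pre ++ [ch]) rest := by
        simpa [pvSplitSpec, hc] using hp
      refine ih (pre ++ [ch]) ?_ p hp'
      intro hm
      rcases List.mem_append.1 hm with hm | hm
      · exact h hm
      · simp at hm; exact hc hm.symm

theorem pvFold_noNL (a : List Char) :
    '\n' ∉ a → ∀ g cur nc, a.foldl pvStepA (g, cur, nc) = (g, cur ++ a, nc) := by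
  induction a with
  | nil => intro _ g cur nc; simp
  | cons c t ih =>
    intro h g cur nc
    have hc : ¬ c = '\n' := by
      intro e; exact h (by simp [e])
    have ht : '\n' ∉ t := fun hm => h (List.mem_cons_of_mem _ hm)
    simp only [List.foldl_cons, pvStepA, if_neg hc]
    rw [ih ht g (cur ++ [c]) nc]
    simp

def pvConsA (cur : List Char) (parts : List (List Char)) : List (List Char) :=
  match parts with
  | [] => [cur]
  | a :: rest => (cur ++ a) :: rest

theorem pvPairUp_small (ps : List (List Char)) (h : ps.length ≤ 2) :
    pvPairUp ps = if PySem.Chars.join ['\n'] ps ≠ [] then [PySem.Chars.join ['\n'] ps] else [] := by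
  rcases ps with _ | ⟨a, _ | ⟨b, _ | ⟨c, t⟩⟩⟩
  · simp [pvPairUp.eq_def]
  · simp [pvPairUp.eq_def]
  · simp [pvPairUp.eq_def]
  · simp at h

theorem pvMainSmall (ps : List (List Char)) (hlen : ps.length ≤ 2)
    (hp : ∀ p ∈ ps, '\n' ∉ p) :
    ∀ g cur, pvFinishA ((PySem.Chars.join ['\n'] ps).foldl pvStepA (g, cur, 0))
      = g ++ pvPairUp (pvConsA cur ps) := by
  intro g cur
  rcases ps with _ | ⟨a, _ | ⟨b, _ | ⟨c, t⟩⟩⟩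
  · simp only [PySem.Chars.join_nil, List.foldl_nil]
    rw [show pvConsA cur [] = [cur] from rfl, pvPairUp_small [cur] (by simp),
      PySem.Chars.join_singleton]
    unfold pvFinishA
    by_cases hcur : cur = [] <;> simp [hcur]
  · have ha : '\n' ∉ a := hp a (by simp)
    rw [PySem.Chars.join_singleton, pvFold_noNL a ha g cur 0]
    rw [show pvConsA cur [a] = [cur ++ a] from rfl, pvPairUp_small [cur ++ a] (by simp),
      PySem.Chars.join_singleton]
    unfold pvFinishA
    by_cases hca : cur ++ a = [] <;> simp [hca]
  · have ha : '\n' ∉ a := hp a (by simp)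
    have hb : '\n' ∉ b := hp b (by simp)
    rw [PySem.Chars.join_cons_cons, PySem.Chars.join_singleton]
    simp only [List.foldl_append, List.foldl_cons, List.foldl_nil]
    rw [pvFold_noNL a ha g cur 0]
    have s1 : pvStepA (g, cur ++ a, 0) '\n' = (g, (cur ++ a) ++ ['\n'], 1) := by
      simp [pvStepA]
    rw [s1, pvFold_noNL b hb g ((cur ++ a) ++ ['\n']) 1]
    rw [show pvConsA cur [a, b] = [cur ++ a, b] from rfl,
      pvPairUp_small [cur ++ a, b] (by simp),
      PySem.Chars.join_cons_cons, PySem.Chars.join_singleton]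
    unfold pvFinishA
    simp
  · simp at hlen

theorem pvMain (parts : List (List Char)) :
    (∀ p ∈ parts, '\n' ∉ p) →
    ∀ g cur, pvFinishA ((PySem.Chars.join ['\n'] parts).foldl pvStepA (g, cur, 0))
      = g ++ pvPairUp (pvConsA cur parts) := by
  induction parts using pvPairUp.induct with
  | case1 a b head tail ih =>
    intro hp g cur
    have ha : '\n' ∉ a := hp a (by simp)
    have hb : '\n' ∉ b := hp b (by simp)
    have hp' : ∀ p ∈ head :: tail, '\n' ∉ p := by
      intro p hm
      exact hp p (by simp [List.mem_cons] at hm ⊢; tauto)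
    rw [PySem.Chars.join_cons_cons, PySem.Chars.join_cons_cons]
    simp only [List.foldl_append, List.foldl_cons, List.foldl_nil]
    rw [pvFold_noNL a ha g cur 0]
    have s1 : pvStepA (g, cur ++ a, 0) '\n' = (g, (cur ++ a) ++ ['\n'], 1) := by
      simp [pvStepA]
    rw [s1, pvFold_noNL b hb g ((cur ++ a) ++ ['\n']) 1]
    have s2 : pvStepA (g, ((cur ++ a) ++ ['\n']) ++ b, 1) '\n'
        = (g ++ [(((cur ++ a) ++ ['\n']) ++ b) ++ ['\n']], [], 0) := by
      simp [pvStepA]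
    rw [s2, ih hp' (g ++ [(((cur ++ a) ++ ['\n']) ++ b) ++ ['\n']]) []]
    rw [show pvConsA cur (a :: b :: head :: tail) = (cur ++ a) :: b :: head :: tail from rfl,
      show pvConsA ([] : List Char) (head :: tail) = ([] ++ head) :: tail from rfl]
    simp only [List.nil_append]
    have hP : pvPairUp ((cur ++ a) :: b :: head :: tail)
        = ((cur ++ a) ++ '\n' :: (b ++ ['\n'])) :: pvPairUp (head :: tail) := by
      conv_lhs => rw [pvPairUp.eq_def]
    rw [hP]
    simp
  | case2 ps hne htail =>
    intro hp g cur
    have hlen : ps.length ≤ 2 := by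
      rcases ps with _ | ⟨x, _ | ⟨y, _ | ⟨z, t⟩⟩⟩
      · simp
      · simp
      · simp
      · exact ((hne x y z t rfl)).elim
    exact pvMainSmall ps hlen hp g cur
  | case3 ps hne htail =>
    intro hp g cur
    have hlen : ps.length ≤ 2 := by
      rcases ps with _ | ⟨x, _ | ⟨y, _ | ⟨z, t⟩⟩⟩
      · simp
      · simp
      · simp
      · exact ((hne x y z t rfl)).elim
    exact pvMainSmall ps hlen hp g cur

theorem pvGroups_eq (cs : List Char) : pvGroupsA cs = pvGroupsB cs := by
  obtain ⟨a, t, ht⟩ : ∃ a t, pvSplitSpec [] cs = a :: t := by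
    rcases h : pvSplitSpec ([] : List Char) cs with _ | ⟨a, t⟩
    · exact absurd h (pvSplitSpec_ne_nil cs [])
    · exact ⟨a, t, rfl⟩
  have hm := pvMain (pvSplitSpec [] cs) (pvSplitSpec_noNL cs [] (by simp)) [] []
  rw [pvJoin_splitSpec cs []] at hm
  unfold pvGroupsA pvGroupsB
  rw [pvSplitOn_eq]
  simp only [List.nil_append] at hm
  rw [hm, ht]
  simp [pvConsA]

theorem pvBlank_eq (c : Option String) : pvBlankA c = pvBlankB c := by
  cases c with
  | none => decide
  | some s => rfl

theorem pvFindJ_eq_blanks (rs : List (List (Option String))) (n i : Nat) :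
    ∀ b, pvFindJ rs n (i + 1 + b) = i + 1 + pvBlanksB rs n i b := by
  intro b
  fun_induction pvBlanksB rs n i b with
  | case1 b h hb ih =>
    rw [pvFindJ]
    have hb' : pvBlankA ((rs.getD (i + 1 + b) []).getD 1 none) = true := by
      rw [pvBlank_eq]; exact hb
    simp only [dif_pos h, if_pos hb']
    have e : i + 1 + b + 1 = i + 1 + (b + 1) := by omega
    rw [e, ih]
  | case2 b h hb =>
    rw [pvFindJ]
    have hb' : ¬ pvBlankA ((rs.getD (i + 1 + b) []).getD 1 none) = true := by
      rw [pvBlank_eq]; simpa using hb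
    simp only [dif_pos h, if_neg hb']
  | case3 b h =>
    rw [pvFindJ]
    simp [dif_neg h]

theorem pvWrite_eq (rs : List (List (Option String))) (i : Nat) (G : List (List Char))
    (bl : Nat) (hG : G ≠ []) :
    (List.range' 0 (min (bl + 1) G.length)).foldl
        (fun acc k => pvSetCell acc (i + k) (G.getD k [])) rs
      = (List.range' 1 (min (bl + 1) G.length - 1)).foldl
          (fun acc k => pvSetCell acc (i + k) (G.getD k []))
          (pvSetCell rs i (G.getD 0 [])) := by
  have hlen : 0 < G.length := List.length_pos_of_ne_nil hG
  have hm : min (bl + 1) G.length = (min (bl + 1) G.length - 1) + 1 := by omega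
  rw [hm, List.range'_succ]
  simp

theorem pvLoop_eq (n : Nat) : ∀ (k i : Nat) (rs : List (List (Option String))),
    n - i ≤ k → pvLoopA n rs i = pvLoopB n rs i := by
  intro k
  induction k with
  | zero =>
    intro i rs h
    have hi : ¬ i < n := by omega
    rw [pvLoopA, pvLoopB]
    simp [hi]
  | succ k ih =>
    intro i rs h
    by_cases hi : i < n
    · rw [pvLoopA, pvLoopB]
      simp only [dif_pos hi]
      set cell := PySem.Chars.strip (((rs.getD i []).getD 1 none).getD "").toList with hcell
      by_cases hcnt : 2 < PySem.Chars.count cell ['\n']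
      · have hcnt' : ¬ PySem.Chars.count cell ['\n'] ≤ 2 := by omega
        simp only [if_pos hcnt, if_neg hcnt']
        have hjb : pvFindJ rs n (i + 1) = i + 1 + pvBlanksB rs n i 0 := by
          simpa using pvFindJ_eq_blanks rs n i 0
        have hG := pvGroups_eq cell
        by_cases hg : pvGroupsB cell = []
        · rw [hG, hg]
          simp only [ne_eq, not_true_eq_false, List.length_nil,
            Nat.min_zero, List.range'_zero, List.foldl_nil]
          rw [hjb]
          exact ih (i + 1 + pvBlanksB rs n i 0) rs (by omega)
        · rw [hG]
          simp only [ne_eq, hg, not_false_eq_true, if_pos]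
          rw [hjb]
          have hntf : i + 1 + pvBlanksB rs n i 0 - (i + 1) = pvBlanksB rs n i 0 := by omega
          rw [hntf]
          rw [← pvWrite_eq rs i (pvGroupsB cell) (pvBlanksB rs n i 0) hg]
          exact ih (i + 1 + pvBlanksB rs n i 0) _ (by omega)
      · have hcnt' : PySem.Chars.count cell ['\n'] ≤ 2 := by omega
        simp only [if_neg hcnt, if_pos hcnt']
        exact ih (i + 1) rs (by omega)
    · rw [pvLoopA, pvLoopB]
      simp [hi]

-- ===== VERDICT (by name: the statement is the Claim_ definition above) =====
theorem fix_transaction_description_spec : Claim_equal_fix_transaction_description := by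
  intro rows _ _
  unfold Spec_fix_transaction_description fix_transaction_description fix_transaction_description_alt
  exact pvLoop_eq rows.length (rows.length) 0 rows (by omega)
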